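-- pv_equiv track=rewrite | github.com/bkmandge/Interview-Preparation | Array Ques/1898. Maximum Number of Removable Chars.py | maximumRemovables
-- ===== SOURCE A (Python) =====
-- from typing import List
--
-- def maximumRemovables(s: str, p: str, removable: List[int]) -> int:
--     def isSubseq(s, subseq):
--         i1, i2 = 0, 0
--
--         while i1 < len(s) and i2 < len(subseq):
--             if i1 in removed or s[i1] != subseq[i2]:
--                 i1 += 1
--                 continue
--             i1 += 1
--             i2 += 1
--         return i2 == len(subseq)
--
--     res = 0
--     l, r = 0, len(removable) - 1
--
--     while l <= r:
--         mid = (l + r) // 2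
--
--         removed = set(removable[: mid + 1])  # chars removed from s
--         if isSubseq(s, p):
--             res = max(res, mid + 1)  # returning number of removable chars mid + 1, index starts from 0 so mid + 1
--             l = mid + 1
--         else:
--             r = mid - 1
--     return res
-- ===== SOURCE B (Python) =====
-- from typing import List
--
-- def maximumRemovables(s: str, p: str, removable: List[int]) -> int:
--     # Linear scan over the number of removals (predicate is monotone), growing the
--     # removed set one index at a time; subsequence test via the iterator idiom.
--     def isSubseq(chars):
--         it = iter(chars)
--         return all(c in it for c in p)
--
--     removed = set()
--     res = 0
--     for k, idx in enumerate(removable, start=1):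
--         removed.add(idx)
--         if not isSubseq(c for i, c in enumerate(s) if i not in removed):
--             break
--         res = k
--     return res
-- ===== Notes on version B (the rewrite author's own statement) =====
-- stated objective: simpler
-- what changed: Replaces the binary search over the removal count (with a hand-rolled two-pointer subsequence check over index sets) by a linear scan that grows the removed set one index at a time and stops at the first failure, testing subsequence-ness with the idiomatic iterator trick on the filtered string; equal because the predicate is monotone.
import Mathlib
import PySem

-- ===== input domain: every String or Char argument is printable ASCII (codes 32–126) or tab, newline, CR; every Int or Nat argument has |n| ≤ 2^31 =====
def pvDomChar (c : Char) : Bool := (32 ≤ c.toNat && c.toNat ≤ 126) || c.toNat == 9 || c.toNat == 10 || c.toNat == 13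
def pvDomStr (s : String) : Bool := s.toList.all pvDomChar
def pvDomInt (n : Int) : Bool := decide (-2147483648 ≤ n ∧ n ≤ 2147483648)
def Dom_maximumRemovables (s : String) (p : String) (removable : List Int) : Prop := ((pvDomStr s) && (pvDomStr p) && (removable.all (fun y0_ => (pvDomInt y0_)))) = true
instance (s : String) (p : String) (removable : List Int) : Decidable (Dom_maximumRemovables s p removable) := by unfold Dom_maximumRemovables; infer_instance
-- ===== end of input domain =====

-- B replaces A's binary search over the removal count by a linear scan with an
-- incrementally grown removed set and an iterator-style subsequence check (objective: simpler).

-- ===== PORT A =====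
-- A's inner two-pointer while loop `isSubseq` (i1 over s, i2 over p, skipping removed indices)
def isSubseqA (cs ps : List Char) (removed : PySem.Set Int) (i1 i2 : Nat) : Bool :=
  if h : i1 < cs.length ∧ i2 < ps.length then
    if PySem.Set.contains removed (i1 : Int) || (cs[i1]'h.1 != ps[i2]'h.2) then
      isSubseqA cs ps removed (i1 + 1) i2
    else
      isSubseqA cs ps removed (i1 + 1) (i2 + 1)
  else
    i2 == ps.length
termination_by cs.length - i1

-- A's outer binary-search while loop (res, l, r)
def loopA (cs ps : List Char) (removable : List Int) (res l r : Int) : Int :=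
  if h : l ≤ r then
    let mid := PySem.Int.floordiv (l + r) 2
    let removed := PySem.Set.ofList (PySem.List.slice removable none (some (mid + 1)))
    if isSubseqA cs ps removed 0 0 then
      loopA cs ps removable (max res (mid + 1)) (mid + 1) r
    else
      loopA cs ps removable res l (mid - 1)
  else
    res
termination_by (r - l + 1).toNat
decreasing_by
  · have := PySem.Int.floordiv_two_mid_bounds h; omega
  · have := PySem.Int.floordiv_two_mid_bounds h; omega

def maximumRemovables (s : String) (p : String) (removable : List Int) : Int :=
  loopA s.toList p.toList removable 0 0 (PySem.List.len removable - 1)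

-- ===== PORT B =====
-- B's `isSubseq`: iterator idiom `all(c in it for c in p)` — consume chars until c is found
def isSubseqB : List Char → List Char → Bool
  | [], _ => true
  | q :: qs, chars =>
    match chars.dropWhile (fun c => c != q) with
    | [] => false
    | _ :: rest => isSubseqB qs rest

-- B's filtered view `(c for i, c in enumerate(s) if i not in removed)`
def filteredB (cs : List Char) (removed : PySem.Set Int) : List Char :=
  (PySem.List.enumerate cs 0).filterMap
    (fun ic => if PySem.Set.contains removed ic.1 then none else some ic.2)

-- B's for loop with break: k is the 1-based counter, res the last successful k
def loopB (cs ps : List Char) (removed : PySem.Set Int) : List Int → Int → Int → Int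
  | [], _, res => res
  | idx :: rest, k, res =>
    let removed' := PySem.Set.add removed idx
    if isSubseqB ps (filteredB cs removed') then
      loopB cs ps removed' rest (k + 1) k
    else
      res

def maximumRemovables_alt (s : String) (p : String) (removable : List Int) : Int :=
  loopB s.toList p.toList PySem.Set.empty removable 1 0

-- ===== PRECONDITION & SPEC =====
def Spec_maximumRemovables (s : String) (p : String) (removable : List Int) (out : Int) : Prop := out = maximumRemovables_alt s p removable
instance (s : String) (p : String) (removable : List Int) (out : Int) : Decidable (Spec_maximumRemovables s p removable out) := by unfold Spec_maximumRemovables; infer_instance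

-- ===== CLAIM (what is proved, stated in full; the proofs are below) =====
def Claim_equal_maximumRemovables : Prop := ∀ (s : String) (p : String) (removable : List Int), Dom_maximumRemovables s p removable → Spec_maximumRemovables s p removable (maximumRemovables s p removable)

-- ===== LEMMAS AND PROOFS =====

-- chars of cs (counted from index i) whose index is not in R
def filtIdx (R : List Int) : List Char → Nat → List Char
  | [], _ => []
  | c :: cs, i => if (i : Int) ∈ R then filtIdx R cs (i + 1) else c :: filtIdx R cs (i + 1)

-- the monotone predicate: p is a subsequence of s after removing the first k indices
abbrev PredK (cs ps : List Char) (removable : List Int) (k : Nat) : Prop :=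
  ps.Sublist (filtIdx (removable.take k) cs 0)

-- the common value: largest k ≤ n with PredK k (0 if none)
def best (cs ps : List Char) (removable : List Int) : Nat → Nat
  | 0 => 0
  | k + 1 => if PredK cs ps removable (k + 1) then k + 1 else best cs ps removable k

theorem filtIdx_congr (R R' : List Int) (cs : List Char) (i : Nat)
    (h : ∀ x, x ∈ R ↔ x ∈ R') : filtIdx R cs i = filtIdx R' cs i := by
  induction cs generalizing i with
  | nil => rfl
  | cons c cs ih =>
      simp only [filtIdx, h]
      split <;> simp [ih]

theorem filtIdx_mono (R R' : List Int) (cs : List Char) (i : Nat)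
    (h : ∀ x, x ∈ R → x ∈ R') : (filtIdx R' cs i).Sublist (filtIdx R cs i) := by
  induction cs generalizing i with
  | nil => exact List.Sublist.refl _
  | cons c cs ih =>
      simp only [filtIdx]
      by_cases hR : (i : Int) ∈ R
      · simp [hR, h _ hR, ih]
      · simp only [hR, if_false]
        by_cases hR' : (i : Int) ∈ R'
        · simp only [hR', if_true]
          exact (ih (i + 1)).trans (List.sublist_cons_self _ _)
        · simp only [hR', if_false]
          exact (ih (i + 1)).cons₂ c

theorem predK_antitone (cs ps : List Char) (removable : List Int) (j k : Nat)
    (hjk : j ≤ k) (h : PredK cs ps removable k) : PredK cs ps removable j := by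
  unfold PredK at *
  refine h.trans (filtIdx_mono _ _ _ _ ?_)
  intro x hx
  have : removable.take j = (removable.take k).take j := by
    rw [List.take_take, Nat.min_eq_left hjk]
  rw [this] at hx
  exact List.mem_of_mem_take hx

-- mismatch step for sublists
theorem cons_sublist_cons_of_ne (q c : Char) (qs l : List Char) (hne : c ≠ q) :
    (q :: qs).Sublist (c :: l) ↔ (q :: qs).Sublist l := by
  constructor
  · intro h
    cases h with
    | cons _ h => exact h
    | cons₂ => exact absurd rfl hne
  · exact fun h => h.cons c

-- ===== characterisation of A's two-pointer check =====
theorem isSubseqA_iff_aux (cs ps : List Char) (R : PySem.Set Int) :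
    ∀ (fuel i1 i2 : Nat), cs.length - i1 ≤ fuel → i2 ≤ ps.length →
    (isSubseqA cs ps R i1 i2 = true ↔ (ps.drop i2).Sublist (filtIdx R (cs.drop i1) i1)) := by
  intro fuel
  induction fuel with
  | zero =>
      intro i1 i2 hf h2
      have hcs : cs.length ≤ i1 := by omega
      rw [isSubseqA, dif_neg (by omega)]
      rw [List.drop_of_length_le hcs]
      simp only [filtIdx, List.sublist_nil, List.drop_eq_nil_iff, beq_iff_eq]
      omega
  | succ fuel ih =>
      intro i1 i2 hf h2
      by_cases hcs : i1 < cs.length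
      · by_cases hps : i2 < ps.length
        · rw [isSubseqA, dif_pos ⟨hcs, hps⟩]
          have hdc : cs[i1] :: cs.drop (i1 + 1) = cs.drop i1 := List.getElem_cons_drop ..
          have hdp : ps[i2] :: ps.drop (i2 + 1) = ps.drop i2 := List.getElem_cons_drop ..
          rw [← hdc, ← hdp]
          simp only [filtIdx]
          by_cases hmem : (i1 : Int) ∈ R
          · have hb : PySem.Set.contains R (i1 : Int) = true := by
              rw [PySem.Set.contains_iff]; exact hmem
            rw [hb, Bool.true_or, if_pos hmem, hdp]
            exact ih (i1 + 1) i2 (by omega) h2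
          · have hb : PySem.Set.contains R (i1 : Int) = false := by
              rw [Bool.eq_false_iff]
              intro hc; exact hmem ((PySem.Set.contains_iff _ _).mp hc)
            rw [hb, Bool.false_or, if_neg hmem]
            by_cases heq : cs[i1] = ps[i2]
            · rw [heq, bne_self_eq_false, if_neg (by simp)]
              rw [List.cons_sublist_cons]
              exact ih (i1 + 1) (i2 + 1) (by omega) (by omega)
            · rw [if_pos (by simp [heq]),
                cons_sublist_cons_of_ne _ _ _ _ heq, hdp]
              exact ih (i1 + 1) i2 (by omega) h2
        · have hlen : i2 = ps.length := by omega
          rw [isSubseqA, dif_neg (by omega)]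
          rw [hlen]
          simp
      · rw [isSubseqA, dif_neg (by omega)]
        rw [List.drop_of_length_le (show cs.length ≤ i1 by omega)]
        simp only [filtIdx, List.sublist_nil, List.drop_eq_nil_iff, beq_iff_eq]
        omega

theorem isSubseqA_iff (cs ps : List Char) (R : PySem.Set Int) (i1 i2 : Nat)
    (h2 : i2 ≤ ps.length) :
    isSubseqA cs ps R i1 i2 = true ↔ (ps.drop i2).Sublist (filtIdx R (cs.drop i1) i1) :=
  isSubseqA_iff_aux cs ps R (cs.length - i1) i1 i2 (le_refl _) h2

-- ===== characterisation of B's iterator check =====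
theorem isSubseqB_iff (ps chars : List Char) :
    isSubseqB ps chars = true ↔ ps.Sublist chars := by
  induction chars generalizing ps with
  | nil =>
      cases ps with
      | nil => simp [isSubseqB]
      | cons q qs => simp [isSubseqB]
  | cons c l ih =>
      cases ps with
      | nil => simp [isSubseqB]
      | cons q qs =>
          by_cases hc : c = q
          · subst hc
            simp only [isSubseqB, List.dropWhile_cons, bne_self_eq_false, Bool.false_eq_true,
              if_false, List.cons_sublist_cons]
            exact ih qs
          · have hb : (c != q) = true := by simp [hc]
            simp only [isSubseqB, List.dropWhile_cons, hb, if_true]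
            rw [cons_sublist_cons_of_ne q c qs l hc]
            exact ih (q :: qs)

-- B's filtered generator equals filtIdx
theorem filteredB_eq (cs : List Char) (R : PySem.Set Int) (i : Nat) :
    (PySem.List.enumerate cs (i : Int)).filterMap
      (fun ic => if PySem.Set.contains R ic.1 then none else some ic.2) = filtIdx R cs i := by
  induction cs generalizing i with
  | nil => simp [PySem.List.enumerate_nil, filtIdx]
  | cons c cs ih =>
      rw [PySem.List.enumerate_cons, List.filterMap_cons]
      have h1 : (i : Int) + 1 = ((i + 1 : Nat) : Int) := by push_cast; ring
      rw [h1, ih]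
      by_cases hR : (i : Int) ∈ R
      · simp [filtIdx, hR]
      · simp [filtIdx, hR]

theorem best_succ (cs ps : List Char) (removable : List Int) (k : Nat) :
    best cs ps removable (k + 1) =
      if PredK cs ps removable (k + 1) then k + 1 else best cs ps removable k := rfl

theorem best_eq_of_pred (cs ps : List Char) (removable : List Int) (m : Nat)
    (h : PredK cs ps removable m ∨ m = 0) : best cs ps removable m = m := by
  cases m with
  | zero => rfl
  | succ k =>
      rcases h with h | h
      · simp [best, h]
      · omega

theorem best_stable (cs ps : List Char) (removable : List Int) (m d : Nat)
    (h : ∀ k, m < k → k ≤ m + d → ¬ PredK cs ps removable k) :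
    best cs ps removable (m + d) = best cs ps removable m := by
  induction d with
  | zero => rfl
  | succ d ih =>
      have hnp : ¬ PredK cs ps removable (m + d + 1) := h _ (by omega) (by omega)
      have e : m + (d + 1) = (m + d) + 1 := rfl
      rw [e, best_succ, if_neg hnp]
      exact ih fun k h1 h2 => h k h1 (by omega)

theorem best_pin (cs ps : List Char) (removable : List Int) (m n : Nat)
    (hmn : m ≤ n)
    (hm : PredK cs ps removable m ∨ m = 0)
    (hbad : ∀ k, m < k → k ≤ n → ¬ PredK cs ps removable k) :
    best cs ps removable n = m := by
  have h1 : best cs ps removable (m + (n - m)) = best cs ps removable m :=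
    best_stable cs ps removable m (n - m) (fun k h1 h2 => hbad k h1 (by omega))
  rw [show n = m + (n - m) by omega, h1, best_eq_of_pred cs ps removable m hm]

-- A's check at a given removal count equals PredK
theorem checkA_iff (cs ps : List Char) (removable : List Int) (K : Nat) :
    isSubseqA cs ps (PySem.Set.ofList (removable.take K)) 0 0 = true ↔
      PredK cs ps removable K := by
  rw [isSubseqA_iff cs ps _ 0 0 (Nat.zero_le _)]
  unfold PredK
  simp only [List.drop_zero]
  rw [filtIdx_congr (PySem.Set.ofList (removable.take K)) (removable.take K) cs 0
    (fun x => PySem.Set.mem_ofList _ x)]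

-- B's check equals PredK
theorem checkB_iff (cs ps : List Char) (removable : List Int) (R : PySem.Set Int) (K : Nat)
    (hR : ∀ x, x ∈ R ↔ x ∈ removable.take K) :
    isSubseqB ps (filteredB cs R) = true ↔ PredK cs ps removable K := by
  rw [isSubseqB_iff]
  unfold filteredB PredK
  rw [show (0 : Int) = ((0 : Nat) : Int) from rfl, filteredB_eq cs R 0,
    filtIdx_congr R (removable.take K) cs 0 hR]

-- ===== loop correctness =====
theorem loopB_correct_aux (cs ps : List Char) (removable : List Int) :
    ∀ (d i : Nat) (R : PySem.Set Int), removable.length - i = d → i ≤ removable.length →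
    (∀ x, x ∈ R ↔ x ∈ removable.take i) →
    (∀ j, 1 ≤ j → j ≤ i → PredK cs ps removable j) →
    loopB cs ps R (removable.drop i) ((i : Int) + 1) (i : Int) =
      (best cs ps removable removable.length : Int) := by
  intro d
  induction d with
  | zero =>
      intro i R hd hi hR hall
      have hin : i = removable.length := by omega
      subst hin
      have hb : best cs ps removable removable.length = removable.length := by
        rcases Nat.eq_zero_or_pos removable.length with h0 | hpos
        · rw [h0]; rfl
        · exact best_eq_of_pred _ _ _ _ (Or.inl (hall _ hpos (le_refl _)))
      rw [List.drop_length]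
      simp [loopB, hb]
  | succ d ihd =>
      intro i R hd hi hR hall
      have hlt : i < removable.length := by omega
      have hdrop : removable.drop i = removable[i] :: removable.drop (i + 1) :=
        (List.getElem_cons_drop ..).symm
      rw [hdrop]
      simp only [loopB]
      have hR' : ∀ x, x ∈ PySem.Set.add R removable[i] ↔ x ∈ removable.take (i + 1) := by
        have ht : removable.take (i + 1) = removable.take i ++ [removable[i]] := by
          rw [List.take_add_one, List.getElem?_eq_getElem hlt]
          rfl
        intro x
        rw [PySem.Set.mem_add, ht, List.mem_append, List.mem_singleton, hR x]
      by_cases hchk : isSubseqB ps (filteredB cs (PySem.Set.add R removable[i])) = true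
      · rw [if_pos hchk]
        have hP : PredK cs ps removable (i + 1) :=
          (checkB_iff cs ps removable _ (i + 1) hR').mp hchk
        have hall' : ∀ j, 1 ≤ j → j ≤ i + 1 → PredK cs ps removable j := by
          intro j h1 h2
          rcases Nat.lt_or_ge j (i + 1) with h | h
          · exact hall j h1 (by omega)
          · have : j = i + 1 := by omega
            rw [this]; exact hP
        have hrec := ihd (i + 1) (PySem.Set.add R removable[i]) (by omega) (by omega) hR' hall'
        have e1 : ((i : Int) + 1 + 1) = (((i + 1 : Nat) : Int) + 1) := by push_cast; ring
        have e2 : ((i : Int) + 1) = ((i + 1 : Nat) : Int) := by push_cast; ring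
        rw [e1, e2]
        exact hrec
      · rw [if_neg hchk]
        have hnP : ¬ PredK cs ps removable (i + 1) :=
          fun h => hchk ((checkB_iff cs ps removable _ (i + 1) hR').mpr h)
        have hb : best cs ps removable removable.length = i := by
          apply best_pin cs ps removable i removable.length (by omega)
          · rcases Nat.eq_zero_or_pos i with h0 | hpos
            · right; exact h0
            · left; exact hall i hpos (le_refl _)
          · intro k hk _ hPk
            exact hnP (predK_antitone cs ps removable (i + 1) k (by omega) hPk)
        rw [hb]

theorem loopB_correct (cs ps : List Char) (removable : List Int) (i : Nat)
    (R : PySem.Set Int) (hi : i ≤ removable.length)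
    (hR : ∀ x, x ∈ R ↔ x ∈ removable.take i)
    (hall : ∀ j, 1 ≤ j → j ≤ i → PredK cs ps removable j) :
    loopB cs ps R (removable.drop i) ((i : Int) + 1) (i : Int) =
      (best cs ps removable removable.length : Int) :=
  loopB_correct_aux cs ps removable (removable.length - i) i R rfl hi hR hall

theorem loopA_correct (cs ps : List Char) (removable : List Int) :
    ∀ (fuel : Nat) (l r : Int), (r + 1 - l).toNat ≤ fuel →
    0 ≤ l → l ≤ r + 1 → r ≤ (removable.length : Int) - 1 →
    (l = 0 ∨ PredK cs ps removable l.toNat) →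
    (∀ k : Nat, r + 1 < (k : Int) → k ≤ removable.length → ¬ PredK cs ps removable k) →
    loopA cs ps removable l l r = (best cs ps removable removable.length : Int) := by
  intro fuel
  induction fuel with
  | zero =>
      intro l r hf h0 hlr hr hm hbad
      have hgt : ¬ l ≤ r := by omega
      rw [loopA, dif_neg hgt]
      have hb : best cs ps removable removable.length = l.toNat := by
        apply best_pin cs ps removable l.toNat removable.length (by omega)
        · rcases hm with h | h
          · right; omega
          · left; exact h
        · intro k hk hkn hPk
          exact hbad k (by omega) hkn hPk
      rw [hb]
      omega
  | succ fuel ihf =>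
      intro l r hf h0 hlr hr hm hbad
      by_cases hle : l ≤ r
      · rw [loopA, dif_pos hle]
        obtain ⟨hml, hmr⟩ := PySem.Int.floordiv_two_mid_bounds hle
        set mid := PySem.Int.floordiv (l + r) 2 with hmid
        have hsl : PySem.List.slice removable none (some (mid + 1)) =
            removable.take (mid + 1).toNat := PySem.List.slice_to _ (by omega)
        have hiff : (isSubseqA cs ps
            (PySem.Set.ofList (PySem.List.slice removable none (some (mid + 1)))) 0 0 = true) ↔
            PredK cs ps removable (mid + 1).toNat := by
          rw [hsl]; exact checkA_iff cs ps removable _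
        by_cases hchk : isSubseqA cs ps
            (PySem.Set.ofList (PySem.List.slice removable none (some (mid + 1)))) 0 0 = true
        · rw [if_pos hchk]
          have hP := hiff.mp hchk
          have hmax : max l (mid + 1) = mid + 1 := max_eq_right (by omega)
          rw [hmax]
          exact ihf (mid + 1) r (by omega) (by omega) (by omega) hr (Or.inr hP) hbad
        · rw [if_neg hchk]
          have hnP : ¬ PredK cs ps removable (mid + 1).toNat := fun h => hchk (hiff.mpr h)
          apply ihf l (mid - 1) (by omega) h0 (by omega) (by omega) hm
          intro k hk _ hPk
          exact hnP (predK_antitone cs ps removable (mid + 1).toNat k (by omega) hPk)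
      · rw [loopA, dif_neg hle]
        have hb : best cs ps removable removable.length = l.toNat := by
          apply best_pin cs ps removable l.toNat removable.length (by omega)
          · rcases hm with h | h
            · right; omega
            · left; exact h
          · intro k hk hkn hPk
            exact hbad k (by omega) hkn hPk
        rw [hb]; omega

-- ===== VERDICT (by name: the statement is the Claim_ definition above) =====
theorem maximumRemovables_spec : Claim_equal_maximumRemovables := by
  intro s p removable _
  unfold Spec_maximumRemovables maximumRemovables maximumRemovables_alt
  rw [PySem.List.len_eq]
  have hA := loopA_correct s.toList p.toList removable
    ((removable.length : Int) - 1 + 1 - 0).toNat 0 ((removable.length : Int) - 1)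
    (le_refl _) (le_refl _) (by omega) (by omega) (Or.inl rfl)
    (by intro k hk hk2; omega)
  have hB := loopB_correct s.toList p.toList removable 0 PySem.Set.empty
    (Nat.zero_le _) (by intro x; simp [PySem.Set.empty]) (by omega)
  simpa using hA.trans hB.symm
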